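-- pv_equiv track=rewrite | github.com/anurav088/media-monitor | Entity-Resolution/ER.py | abbreviationsCheck
-- ===== SOURCE A (Python) =====
-- def abbreviationsCheck(name1, name2):
--     name1, name2 = name1.lower(), name2.lower()
--
--     wordList1 = name1.split()
--     wordList2 = name2.split()
--
--     initials1 = {}
--     initials2 = {}
--
--     for i in wordList1:
--         if i[0] not in initials1:
--             initials1[i[0]] = 1
--         else:
--             initials1[i[0]] += 1
--
--     for j in wordList2:
--         if j[0] not in initials2:
--             initials2[j[0]] = 1
--         else:
--             initials2[j[0]] += 1
--
--     if len(wordList1) <= len(wordList2):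
--         smaller = initials1
--         bigger = initials2
--     else:
--         smaller = initials2
--         bigger = initials1
--
--     for i in smaller:
--         while smaller[i] > 0:
--             if i in bigger and bigger[i] > 0:
--                 bigger[i] -= 1
--                 smaller[i] -= 1
--             else:
--                 return False
--     return True
-- ===== SOURCE B (Python) =====
-- def abbreviationsCheck(name1, name2):
--     words1 = name1.lower().split()
--     words2 = name2.lower().split()
--     inits1 = sorted(w[0] for w in words1)
--     inits2 = sorted(w[0] for w in words2)
--     if len(words1) <= len(words2):
--         small, big = inits1, inits2
--     else:
--         small, big = inits2, inits1
--     i = j = 0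
--     while i < len(small):
--         if j == len(big):
--             return False
--         if big[j] < small[i]:
--             j += 1
--         elif big[j] == small[i]:
--             i += 1
--             j += 1
--         else:
--             return False
--     return True
-- ===== Notes on version B (the rewrite author's own statement) =====
-- stated objective: alternative
-- what changed: Replaces the two hash-count dictionaries and the per-key decrementing while-loop with two sorted lists of word-initials consumed by a single two-pointer merge sweep; the smaller/bigger choice stays keyed on word count with the tie going to name1.
import Mathlib
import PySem

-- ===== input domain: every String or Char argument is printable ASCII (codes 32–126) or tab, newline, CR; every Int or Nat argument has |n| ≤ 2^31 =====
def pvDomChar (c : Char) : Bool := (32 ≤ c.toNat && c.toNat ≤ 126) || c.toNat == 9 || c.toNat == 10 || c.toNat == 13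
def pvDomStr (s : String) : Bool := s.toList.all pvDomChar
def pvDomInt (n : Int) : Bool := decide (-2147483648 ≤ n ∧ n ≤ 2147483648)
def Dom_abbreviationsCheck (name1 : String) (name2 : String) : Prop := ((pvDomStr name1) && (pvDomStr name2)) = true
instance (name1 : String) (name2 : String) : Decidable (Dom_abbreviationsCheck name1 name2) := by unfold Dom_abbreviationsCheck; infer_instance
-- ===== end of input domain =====

-- B replaces A's two count-dictionaries and decrementing while-loops by two sorted
-- lists of word-initials checked with one two-pointer merge sweep (alternative
-- decomposition, same result).


-- ===== PORT A =====
-- w[0]: words produced by split() are nonempty, so the none case (Python IndexError) is unreachable; exact there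
def pvFirstA (w : String) : Char := (PySem.Str.pyGet? w 0).getD ' '

-- the counting loop: 'if i[0] not in d: d[i[0]] = 1 else: d[i[0]] += 1' (used for both names)
def pvCountA (wordList : List String) : PySem.Dict Char Int :=
  wordList.foldl (fun d w =>
    if d.contains (pvFirstA w) then d.insert (pvFirstA w) (d.getD (pvFirstA w) 0 + 1)
    else d.insert (pvFirstA w) 1) PySem.Dict.empty

-- 'while smaller[i] > 0: if i in bigger and bigger[i] > 0: …' — the effect on the counts at key i;
-- none = 'return False', some b' = bigger[i] after the loop (smaller[i] ends at 0)
def pvWhileA (s b : Int) : Option Int :=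
  if 0 < s then
    (if 0 < b then pvWhileA (s - 1) (b - 1) else none)
  else some b
termination_by s.toNat
decreasing_by omega

-- 'for i in smaller: …' over the keys, threading both dicts
def pvOuterA : List Char → PySem.Dict Char Int → PySem.Dict Char Int → Bool
  | [], _, _ => true
  | c :: rest, sm, bg =>
    match pvWhileA (sm.getD c 0) (bg.getD c 0) with
    | none => false
    | some b' => pvOuterA rest (sm.insert c 0) (bg.insert c b')

def abbreviationsCheck (name1 : String) (name2 : String) : Bool :=
  let wordList1 := PySem.Str.split₀ (PySem.Str.lower name1)
  let wordList2 := PySem.Str.split₀ (PySem.Str.lower name2)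
  let initials1 := pvCountA wordList1
  let initials2 := pvCountA wordList2
  if wordList1.length ≤ wordList2.length then
    pvOuterA initials1.keys initials1 initials2
  else
    pvOuterA initials2.keys initials2 initials1

-- ===== PORT B =====
-- w[0]: words produced by split() are nonempty, so the none case (Python IndexError) is unreachable; exact there
def pvFirstB (w : String) : Char := (PySem.Str.pyGet? w 0).getD ' '

-- Source B's two-pointer sweep: the index pair (i, j) walking (small, big) becomes
-- structural recursion on the two remaining suffixes
def pvMergeB : List Char → List Char → Bool
  | [], _ => true
  | _ :: _, [] => false
  | c :: cs, d :: ds =>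
    if d < c then pvMergeB (c :: cs) ds
    else if d = c then pvMergeB cs ds
    else false
termination_by small big => small.length + big.length

def abbreviationsCheck_alt (name1 : String) (name2 : String) : Bool :=
  let words1 := PySem.Str.split₀ (PySem.Str.lower name1)
  let words2 := PySem.Str.split₀ (PySem.Str.lower name2)
  let inits1 := PySem.List.sorted (words1.map pvFirstB) (fun c => c) false
  let inits2 := PySem.List.sorted (words2.map pvFirstB) (fun c => c) false
  if words1.length ≤ words2.length then pvMergeB inits1 inits2
  else pvMergeB inits2 inits1

-- ===== PRECONDITION & SPEC =====
def Spec_abbreviationsCheck (name1 : String) (name2 : String) (out : Bool) : Prop := out = abbreviationsCheck_alt name1 name2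
instance (name1 : String) (name2 : String) (out : Bool) : Decidable (Spec_abbreviationsCheck name1 name2 out) := by unfold Spec_abbreviationsCheck; infer_instance

-- ===== CLAIM (what is proved, stated in full; the proofs are below) =====
def Claim_equal_abbreviationsCheck : Prop := ∀ (name1 : String) (name2 : String), Dom_abbreviationsCheck name1 name2 → Spec_abbreviationsCheck name1 name2 (abbreviationsCheck name1 name2)

-- ===== LEMMAS AND PROOFS =====

-- A's counter fold, with the if pulled inside the insert
theorem pvCountA_eq (ws : List String) :
    pvCountA ws = ws.foldl (fun d w =>
      d.insert (pvFirstA w) (if d.contains (pvFirstA w) then d.getD (pvFirstA w) 0 + 1 else 1))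
      PySem.Dict.empty := by
  unfold pvCountA
  congr 1
  funext d w
  split <;> simp_all

theorem pvCountA_getD_aux (ws : List String) (d : PySem.Dict Char Int) (c : Char) :
    (ws.foldl (fun d w =>
      d.insert (pvFirstA w) (if d.contains (pvFirstA w) then d.getD (pvFirstA w) 0 + 1 else 1)) d).getD c 0
      = d.getD c 0 + ((ws.map pvFirstA).count c : Int) := by
  induction ws generalizing d with
  | nil => simp
  | cons w ws ih =>
    simp only [List.foldl_cons, ih, List.map_cons, List.count_cons]
    rw [PySem.Dict.getD_insert]
    by_cases hc : c = pvFirstA w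
    · rw [if_pos hc, hc]
      by_cases hin : d.contains (pvFirstA w)
      · rw [if_pos hin]
        simp only [beq_self_eq_true]
        push_cast; ring
      · rw [if_neg hin,
          PySem.Dict.getD_of_not_contains d 0 (by simpa using hin)]
        simp only [beq_self_eq_true]
        push_cast; ring
    · rw [if_neg hc]
      have : (pvFirstA w == c) = false := by simpa using Ne.symm hc
      simp [this]

-- A's counter fold computes the multiset of word-initials
theorem pvCountA_getD (ws : List String) (c : Char) :
    (pvCountA ws).getD c 0 = ((ws.map pvFirstA).count c : Int) := by
  rw [pvCountA_eq, pvCountA_getD_aux]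
  simp

theorem pvCountA_keys (ws : List String) :
    (pvCountA ws).keys = PySem.Set.ofList (ws.map pvFirstA) := by
  rw [pvCountA_eq, PySem.Dict.keys_foldl_insert_key, PySem.Dict.keys_empty,
    PySem.Set.update_nil_left]

theorem pvCountA_keys_nodup (ws : List String) : (pvCountA ws).keys.Nodup := by
  rw [pvCountA_keys]; exact PySem.Set.nodup_ofList _

theorem pvWhileA_eq (s b : Int) (hs : 0 ≤ s) (hb : 0 ≤ b) :
    pvWhileA s b = if s ≤ b then some (b - s) else none := by
  obtain ⟨n, rfl⟩ : ∃ n : Nat, s = (n : Int) := ⟨s.toNat, (Int.toNat_of_nonneg hs).symm⟩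
  clear hs
  induction n generalizing b with
  | zero =>
    rw [pvWhileA, if_neg (by omega), if_pos (by exact_mod_cast hb)]
    norm_num
  | succ n ih =>
    rw [pvWhileA, if_pos (by push_cast; omega)]
    by_cases hbp : (0 : Int) < b
    · rw [if_pos hbp]
      have h2 : ((n + 1 : Nat) : Int) - 1 = (n : Int) := by push_cast; ring
      rw [h2, ih (b - 1) (by omega)]
      by_cases h3 : ((n + 1 : Nat) : Int) ≤ b
      · rw [if_pos (by push_cast at h3 ⊢; omega), if_pos h3]
        congr 1; push_cast; ring
      · rw [if_neg (by push_cast at h3 ⊢; omega), if_neg h3]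
    · rw [if_neg hbp, if_neg (by push_cast; omega)]

theorem pvOuterA_iff (keys : List Char) (sm bg : PySem.Dict Char Int)
    (hnd : keys.Nodup) (hpos : ∀ c, 0 ≤ sm.getD c 0) (hbpos : ∀ c, 0 ≤ bg.getD c 0) :
    pvOuterA keys sm bg = true ↔ ∀ c ∈ keys, sm.getD c 0 ≤ bg.getD c 0 := by
  induction keys generalizing sm bg with
  | nil => simp [pvOuterA]
  | cons c rest ih =>
    have hnotmem : c ∉ rest := (List.nodup_cons.mp hnd).1
    rw [pvOuterA, pvWhileA_eq _ _ (hpos c) (hbpos c)]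
    by_cases hsb : sm.getD c 0 ≤ bg.getD c 0
    · rw [if_pos hsb]
      rw [ih (sm.insert c 0) (bg.insert c (bg.getD c 0 - sm.getD c 0))
        (List.nodup_cons.mp hnd).2
        (by intro c'; rw [PySem.Dict.getD_insert]; split
            · omega
            · exact hpos c')
        (by intro c'; rw [PySem.Dict.getD_insert]; split
            · omega
            · exact hbpos c')]
      constructor
      · intro H c' hc'
        rcases List.mem_cons.mp hc' with h | h
        · exact h ▸ hsb
        · have hne : c' ≠ c := fun he => hnotmem (he ▸ h)
          have := H c' h
          rwa [PySem.Dict.getD_insert, PySem.Dict.getD_insert, if_neg hne, if_neg hne] at this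
      · intro H c' h
        have hne : c' ≠ c := fun he => hnotmem (he ▸ h)
        rw [PySem.Dict.getD_insert, PySem.Dict.getD_insert, if_neg hne, if_neg hne]
        exact H c' (List.mem_cons_of_mem _ h)
    · rw [if_neg hsb]
      simp only [Bool.false_eq_true, false_iff]
      intro H
      exact hsb (H c List.mem_cons_self)

-- A's side for one direction choice equals the multiset-inclusion condition
theorem pvOuterA_counts (ls lb : List String) :
    pvOuterA (pvCountA ls).keys (pvCountA ls) (pvCountA lb) = true ↔
      ∀ c : Char, (ls.map pvFirstA).count c ≤ (lb.map pvFirstA).count c := by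
  rw [pvOuterA_iff _ _ _ (pvCountA_keys_nodup ls)
    (by intro c; rw [pvCountA_getD]; exact Int.natCast_nonneg _)
    (by intro c; rw [pvCountA_getD]; exact Int.natCast_nonneg _)]
  simp only [pvCountA_getD, pvCountA_keys, Nat.cast_le]
  constructor
  · intro H c
    by_cases hc : c ∈ ls.map pvFirstA
    · exact H c ((PySem.Set.mem_ofList _ _).mpr hc)
    · rw [List.count_eq_zero_of_not_mem hc]; exact Nat.zero_le _
  · intro H c _
    exact H c

-- B's merge on sorted lists decides multiset inclusion of the small list in the big one
theorem pvMergeB_iff : ∀ (big small : List Char), small.Pairwise (· ≤ ·) → big.Pairwise (· ≤ ·) →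
    (pvMergeB small big = true ↔ ∀ c : Char, small.count c ≤ big.count c) := by
  intro big
  induction big with
  | nil =>
    intro small _ _
    cases small with
    | nil => simp [pvMergeB]
    | cons c cs =>
      simp only [pvMergeB, Bool.false_eq_true, false_iff]
      intro H
      have := H c
      simp [List.count_cons_self] at this
  | cons d ds ih =>
    intro small hs hb
    obtain ⟨hd, hb'⟩ := List.pairwise_cons.mp hb
    cases small with
    | nil => simp [pvMergeB]
    | cons c cs =>
      obtain ⟨hc, hs'⟩ := List.pairwise_cons.mp hs
      rcases lt_trichotomy d c with h | h | h
      · -- big's head is strictly below small's head: skip it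
        rw [show pvMergeB (c :: cs) (d :: ds) = pvMergeB (c :: cs) ds from by
          rw [pvMergeB, if_pos h]]
        rw [ih (c :: cs) hs hb']
        have hdn : d ∉ c :: cs := by
          intro hm
          rcases List.mem_cons.mp hm with he | hm
          · exact absurd he (ne_of_gt h).symm
          · exact absurd (hc d hm) (not_le.mpr h)
        constructor
        · intro H e
          calc (c :: cs).count e ≤ ds.count e := H e
            _ ≤ (d :: ds).count e := by rw [List.count_cons]; split <;> omega
        · intro H e
          by_cases he : e = d
          · subst he
            rw [List.count_eq_zero_of_not_mem hdn]
            exact Nat.zero_le _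
          · have := H e
            rwa [List.count_cons_of_ne (Ne.symm he)] at this
      · -- equal heads: consume both
        subst h
        rw [show pvMergeB (d :: cs) (d :: ds) = pvMergeB cs ds from by
          rw [pvMergeB, if_neg (lt_irrefl d), if_pos rfl]]
        rw [ih cs hs' hb']
        constructor
        · intro H e
          by_cases he : e = d
          · subst he
            rw [List.count_cons_self, List.count_cons_self]
            exact Nat.succ_le_succ (H e)
          · rw [List.count_cons_of_ne (Ne.symm he), List.count_cons_of_ne (Ne.symm he)]
            exact H e
        · intro H e
          by_cases he : e = d
          · subst he
            have := H e
            rw [List.count_cons_self, List.count_cons_self] at this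
            omega
          · have := H e
            rwa [List.count_cons_of_ne (Ne.symm he), List.count_cons_of_ne (Ne.symm he)] at this
      · -- small's head is absent from big: fail
        rw [show pvMergeB (c :: cs) (d :: ds) = false from by
          rw [pvMergeB, if_neg (asymm h), if_neg (ne_of_gt h)]]
        simp only [Bool.false_eq_true, false_iff]
        intro H
        have h1 := H c
        have hcn : c ∉ d :: ds := by
          intro hm
          rcases List.mem_cons.mp hm with he | hm
          · exact absurd he (ne_of_lt h)
          · exact absurd (hd c hm) (not_le.mpr h)
        rw [List.count_cons_self, List.count_eq_zero_of_not_mem hcn] at h1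
        omega

theorem pvMergeB_sorted_iff (xs ys : List Char) :
    pvMergeB (PySem.List.sorted xs (fun c => c) false) (PySem.List.sorted ys (fun c => c) false) = true ↔
      ∀ c : Char, xs.count c ≤ ys.count c := by
  rw [pvMergeB_iff _ _ (PySem.List.sorted_pairwise xs _) (PySem.List.sorted_pairwise ys _)]
  constructor <;> intro H c <;>
  · have h1 := (PySem.List.sorted_perm xs (fun c => c) false).count_eq c
    have h2 := (PySem.List.sorted_perm ys (fun c => c) false).count_eq c
    have h3 := H c
    omega

-- ===== VERDICT (by name: the statement is the Claim_ definition above) =====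
theorem abbreviationsCheck_spec : Claim_equal_abbreviationsCheck := by
  intro name1 name2 _
  unfold Spec_abbreviationsCheck abbreviationsCheck abbreviationsCheck_alt
  have hfb : pvFirstB = pvFirstA := rfl
  simp only [hfb]
  split
  · rw [Bool.eq_iff_iff, pvOuterA_counts, pvMergeB_sorted_iff]
  · rw [Bool.eq_iff_iff, pvOuterA_counts, pvMergeB_sorted_iff]
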